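-- pv_equiv track=rewrite | github.com/NGogireddy/Capstone-Projects | EulersPathDirectional.py | get_euler_path
-- ===== SOURCE A (Python) =====
-- def get_euler_path(start_node,graph,degrees):
-- 	'''
-- 	Get the next link in Euler path and recursively call this function to get the path/circuit.
-- 	'''
-- 	next_node = ''
-- 	count = 0
--
-- 	# The next node is the one which has most outdegree in its directly linked nodes.
--
-- 	for node in graph[start_node]:
-- 		if count < degrees[node][0]:
-- 			count = degrees[node][0]
-- 			next_node = node
-- 	if next_node == '':
-- 		next_node = graph[start_node][0]
--
-- 	# Remove the link and attach it to the Eulers path/circuit.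
--
-- 	degrees[start_node][0] -= 1
-- 	degrees[next_node][1] -= 1
-- 	path = next_node + ' --> '
-- 	graph[start_node].remove(next_node)
--
-- 	if len(graph[next_node]) != 0:
-- 		return(path + get_euler_path(next_node,graph,degrees))
-- 	else:
-- 		return(next_node)
-- ===== SOURCE B (Python) =====
-- def get_euler_path(start_node, graph, degrees):
--     '''Iterative re-implementation. Works on its own copies (does not mutate the
--     caller's graph/degrees) and keeps only a single out-degree counter per node:
--     the in-degree bookkeeping of the original is dropped because it never
--     influences the chosen path. The next hop is picked by computing the maximum
--     remaining out-degree among the neighbours and taking the first neighbour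
--     attaining it (same first-maximum tie-break), falling back to the first
--     neighbour when the maximum is not positive.'''
--     adj = {k: list(v) for k, v in graph.items()}
--     out = {k: v[0] for k, v in degrees.items()}
--     result = ''
--     cur = start_node
--     while True:
--         nbrs = adj[cur]
--         m = max(out[n] for n in nbrs)
--         nxt = next(n for n in nbrs if out[n] == m) if m > 0 else nbrs[0]
--         out[cur] -= 1
--         nbrs.pop(nbrs.index(nxt))
--         if adj[nxt]:
--             result += nxt + ' --> '
--             cur = nxt
--         else:
--             return result + nxt
-- ===== Notes on version B (the rewrite author's own statement) =====
-- stated objective: alternative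
-- what changed: A's tail recursion that mutates the caller's graph/degrees and builds the string back-to-front is replaced by an iterative accumulator loop over B's own copies that keeps a single out-degree counter per node (dropping the in-degree bookkeeping entirely) and picks the next hop by computing the maximum counter among the neighbours and taking the first neighbour attaining it, instead of A's running strictly-greater scan with a '' sentinel.
import Mathlib
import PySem

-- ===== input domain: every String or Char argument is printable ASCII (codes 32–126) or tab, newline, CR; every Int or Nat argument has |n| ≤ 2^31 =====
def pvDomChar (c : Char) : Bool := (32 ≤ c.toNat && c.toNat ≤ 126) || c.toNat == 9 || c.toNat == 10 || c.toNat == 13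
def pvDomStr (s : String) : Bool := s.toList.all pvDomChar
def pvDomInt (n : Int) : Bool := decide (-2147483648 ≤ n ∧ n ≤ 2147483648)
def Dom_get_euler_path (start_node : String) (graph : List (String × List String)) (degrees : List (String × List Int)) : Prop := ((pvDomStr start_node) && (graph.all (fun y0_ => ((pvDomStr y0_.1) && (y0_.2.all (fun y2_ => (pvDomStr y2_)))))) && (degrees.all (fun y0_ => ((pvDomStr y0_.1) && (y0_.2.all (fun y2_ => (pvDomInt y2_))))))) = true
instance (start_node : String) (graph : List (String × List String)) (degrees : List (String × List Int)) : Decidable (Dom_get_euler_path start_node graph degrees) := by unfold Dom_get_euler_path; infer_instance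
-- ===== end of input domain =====

-- B replaces A's tail recursion by an iterative accumulator loop over its own copies of the data:
-- it keeps a single out-degree counter per node (dropping A's in-degree bookkeeping entirely) and picks
-- the next hop as "first neighbour attaining the maximum counter" instead of A's running strictly-greater
-- scan with a '' sentinel. Equivalence is about the RETURN value only: the Python A mutates graph and
-- degrees in place, B does not.

-- ===== PORT A =====
-- degrees[n][0]; exact when n is a key of degrees and its list is nonempty (guaranteed by Pre_)
def pvDeg0 (d : PySem.Dict String (List Int)) (n : String) : Int := (d.getD n []).getD 0 0
-- l[0] -= 1; exact when l ≠ [] (Pre_)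
def pvDec0 : List Int → List Int
  | [] => []
  | a :: t => (a - 1) :: t
-- l[1] -= 1; exact when 2 ≤ l.length (Pre_)
def pvDec1 : List Int → List Int
  | a :: b :: t => a :: (b - 1) :: t
  | l => l
-- l.remove(v); exact when v ∈ l (Pre_)
def pvRemoveFirst (l : List String) (v : String) : List String := (PySem.List.remove? l v).getD l
-- both ports run on the same fuel: one unit per removed edge suffices (each step removes one neighbour entry)
def pvFuel (graph : List (String × List String)) : Nat := (graph.map (fun p => p.2.length)).sum + 1

-- literal transliteration of A's recursion; fuel only makes the recursion structural (never exhausted on Pre_ inputs)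
def pvEulerRecA (fuel : Nat) (cur : String) (g : PySem.Dict String (List String)) (d : PySem.Dict String (List Int)) : String :=
  match fuel with
  | 0 => ""
  | Nat.succ fuel =>
    let adj := g.getD cur []
    -- for node in graph[start_node]: if count < degrees[node][0]: count, next_node = degrees[node][0], node
    let s := adj.foldl (fun (cn : Int × String) node => if cn.1 < pvDeg0 d node then (pvDeg0 d node, node) else cn) ((0 : Int), "")
    let next := if s.2 = "" then adj.headD "" else s.2
    let d := d.modify cur [] pvDec0
    let d := d.modify next [] pvDec1
    let path := next ++ " --> "
    let g := g.modify cur [] (fun l => pvRemoveFirst l next)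
    if (g.getD next []).length ≠ 0 then path ++ pvEulerRecA fuel next g d else next

def get_euler_path (start_node : String) (graph : List (String × List String)) (degrees : List (String × List Int)) : String :=
  pvEulerRecA (pvFuel graph) start_node (PySem.Dict.ofList graph) (PySem.Dict.ofList degrees)

-- ===== PORT B =====
-- nbrs.pop(nbrs.index(v)); exact when v ∈ nbrs (always the case: v is chosen from nbrs)
def pvPopIndexed (l : List String) (v : String) : List String :=
  match PySem.List.index? l v with
  | some i => ((PySem.List.pop? l (i : Int)).map (fun r => r.2)).getD l
  | none => l

-- literal transliteration of B's while-loop: string accumulator, max-then-first-match selection,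
-- a single Int counter dict (no in-degrees)
def pvEulerLoopB (fuel : Nat) (cur : String) (g : PySem.Dict String (List String)) (out : PySem.Dict String Int) (acc : String) : String :=
  match fuel with
  | 0 => acc
  | Nat.succ fuel =>
    let adj := g.getD cur []
    let m := (PySem.List.max? (adj.map (fun n => out.getD n 0)) (fun v => v)).getD 0
    let nxt := if 0 < m then (adj.find? (fun n => out.getD n 0 == m)).getD "" else adj.headD ""
    let out := out.modify cur 0 (fun x => x - 1)
    let g := g.modify cur [] (fun l => pvPopIndexed l nxt)
    if (g.getD nxt []).length ≠ 0 then pvEulerLoopB fuel nxt g out (acc ++ nxt ++ " --> ")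
    else acc ++ nxt

def get_euler_path_alt (start_node : String) (graph : List (String × List String)) (degrees : List (String × List Int)) : String :=
  pvEulerLoopB (pvFuel graph) start_node (PySem.Dict.ofList graph)
    (PySem.Dict.ofList (degrees.map (fun p => (p.1, PySem.List.pyGetD p.2 0 0)))) ""

-- ===== PRECONDITION & SPEC =====
-- Pre_ excludes (a) inputs where the Python raises (KeyError/IndexError/ValueError: a visited node or
-- neighbour without a graph/degrees entry, a degree list that is too short — for B's copy 'v[0]' this
-- means EVERY degrees value must be nonempty, slightly stronger than what A touches — an empty start
-- adjacency) via a closed-form condition quantified over ALL graph/degrees entries, slightly stronger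
-- than 'no raise along the actual path', so some malformed-but-unvisited entries on which A returns are
-- excluded; and (b) graphs with an empty-string node among the neighbour lists, where A's '' sentinel
-- for 'no candidate yet' collides with the node name and A's fallback choice is an accident of the sentinel.
def Pre_get_euler_path (start_node : String) (graph : List (String × List String)) (degrees : List (String × List Int)) : Prop :=
  (PySem.Dict.ofList graph).contains start_node = true ∧
  (PySem.Dict.ofList graph).getD start_node [] ≠ [] ∧
  (PySem.Dict.ofList degrees).contains start_node = true ∧
  1 ≤ ((PySem.Dict.ofList degrees).getD start_node []).length ∧
  (∀ q ∈ (PySem.Dict.ofList degrees).items, q.2 ≠ []) ∧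
  (∀ p ∈ (PySem.Dict.ofList graph).items, ∀ v ∈ p.2,
      v ≠ "" ∧ (PySem.Dict.ofList graph).contains v = true ∧ (PySem.Dict.ofList degrees).contains v = true ∧
      2 ≤ ((PySem.Dict.ofList degrees).getD v []).length)
instance (start_node : String) (graph : List (String × List String)) (degrees : List (String × List Int)) : Decidable (Pre_get_euler_path start_node graph degrees) := by unfold Pre_get_euler_path; infer_instance

def pvWitness_get_euler_path : String × (List (String × List String)) × (List (String × List Int)) :=
  ("a", [("a", ["b"]), ("b", [])], [("a", [1, 0]), ("b", [0, 1])])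

def Spec_get_euler_path (start_node : String) (graph : List (String × List String)) (degrees : List (String × List Int)) (out : String) : Prop := out = get_euler_path_alt start_node graph degrees
instance (start_node : String) (graph : List (String × List String)) (degrees : List (String × List Int)) (out : String) : Decidable (Spec_get_euler_path start_node graph degrees out) := by unfold Spec_get_euler_path; infer_instance

-- ===== CLAIM (what is proved, stated in full; the proofs are below) =====
def Claim_equal_get_euler_path : Prop := ∀ (start_node : String) (graph : List (String × List String)) (degrees : List (String × List Int)), Dom_get_euler_path start_node graph degrees → Pre_get_euler_path start_node graph degrees → Spec_get_euler_path start_node graph degrees (get_euler_path start_node graph degrees)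

-- ===== LEMMAS AND PROOFS =====

-- A's scan step and the running first-maximum combinator, named so the lemmas can rewrite them
def pvG (f : String → Int) (m y : String) : String := if f m < f y then y else m
def pvStep (f : String → Int) (cn : Int × String) (node : String) : Int × String :=
  if cn.1 < f node then (f node, node) else cn

lemma pvStep_mk (f : String → Int) (c : Int) (nm y : String) :
    pvStep f (c, nm) y = if c < f y then (f y, y) else (c, nm) := rfl

lemma pvFmono (f : String → Int) : ∀ (t : List String) (x : String), f x ≤ f (t.foldl (pvG f) x) := by
  intro t
  induction t with
  | nil => intro x; simp
  | cons z t ih =>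
    intro x
    rw [List.foldl_cons]
    by_cases hxz : f x < f z
    · rw [show pvG f x z = z from by simp [pvG, hxz]]
      exact le_of_lt (lt_of_lt_of_le hxz (ih z))
    · rw [show pvG f x z = x from by simp [pvG, hxz]]
      exact ih x

lemma pvFstay (f : String → Int) : ∀ (t : List String) (x : String), f (t.foldl (pvG f) x) ≤ f x → t.foldl (pvG f) x = x := by
  intro t
  induction t with
  | nil => intro x _; rfl
  | cons z t ih =>
    intro x h
    rw [List.foldl_cons] at h ⊢
    by_cases hxz : f x < f z
    · rw [show pvG f x z = z from by simp [pvG, hxz]] at h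
      exact absurd (le_trans (pvFmono f t z) h) (not_le.mpr hxz)
    · rw [show pvG f x z = x from by simp [pvG, hxz]] at h ⊢
      exact ih x h

lemma pvMem (f : String → Int) : ∀ (t : List String) (x : String), t.foldl (pvG f) x ∈ x :: t := by
  intro t
  induction t with
  | nil => intro x; simp
  | cons z t ih =>
    intro x
    rw [List.foldl_cons]
    by_cases hxz : f x < f z
    · rw [show pvG f x z = z from by simp [pvG, hxz]]
      exact List.mem_cons_of_mem x (ih z)
    · rw [show pvG f x z = x from by simp [pvG, hxz]]
      rcases List.mem_cons.mp (ih x) with h | h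
      · simp [h]
      · exact List.mem_cons_of_mem _ (List.mem_cons_of_mem _ h)

lemma pvPair (f : String → Int) : ∀ (t : List String) (c : Int) (nm x : String), f x = c →
    t.foldl (pvStep f) (c, nm)
      = if c < f (t.foldl (pvG f) x) then (f (t.foldl (pvG f) x), t.foldl (pvG f) x) else (c, nm) := by
  intro t
  induction t with
  | nil =>
    intro c nm x hx
    subst hx
    simp
  | cons y t ih =>
    intro c nm x hx
    rw [List.foldl_cons, List.foldl_cons, pvStep_mk]
    by_cases hy : c < f y
    · rw [if_pos hy, show pvG f x y = y from by simp [pvG, hx ▸ hy]]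
      rw [ih (f y) y y rfl]
      have hc : c < f (t.foldl (pvG f) y) := lt_of_lt_of_le hy (pvFmono f t y)
      rw [if_pos hc]
      by_cases hm : f y < f (t.foldl (pvG f) y)
      · rw [if_pos hm]
      · rw [if_neg hm, pvFstay f t y (not_lt.mp hm)]
    · rw [if_neg hy, show pvG f x y = x from by simp [pvG, hx ▸ hy]]
      exact ih c nm x hx

lemma pvGswap (f : String → Int) : ∀ (t : List String) (x y : String), f x ≤ 0 → f y ≤ 0 →
    t.foldl (pvG f) x = t.foldl (pvG f) y ∨ (f (t.foldl (pvG f) x) ≤ 0 ∧ f (t.foldl (pvG f) y) ≤ 0) := by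
  intro t
  induction t with
  | nil => intro x y hx hy; exact Or.inr ⟨hx, hy⟩
  | cons z t ih =>
    intro x y hx hy
    rw [List.foldl_cons, List.foldl_cons]
    by_cases hz : 0 < f z
    · rw [show pvG f x z = z from by simp [pvG, lt_of_le_of_lt hx hz],
          show pvG f y z = z from by simp [pvG, lt_of_le_of_lt hy hz]]
      exact Or.inl rfl
    · have hzle : f z ≤ 0 := not_lt.mp hz
      by_cases hxz : f x < f z
      · rw [show pvG f x z = z from by simp [pvG, hxz]]
        by_cases hyz : f y < f z
        · rw [show pvG f y z = z from by simp [pvG, hyz]]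
          exact Or.inl rfl
        · rw [show pvG f y z = y from by simp [pvG, hyz]]
          exact ih z y hzle hy
      · rw [show pvG f x z = x from by simp [pvG, hxz]]
        by_cases hyz : f y < f z
        · rw [show pvG f y z = z from by simp [pvG, hyz]]
          exact ih x z hx hzle
        · rw [show pvG f y z = y from by simp [pvG, hyz]]
          exact ih x y hx hy

lemma pvH (f : String → Int) : ∀ (t : List String) (x : String),
    (x :: t).foldl (pvStep f) ((0 : Int), "")
      = if 0 < f (t.foldl (pvG f) x) then (f (t.foldl (pvG f) x), t.foldl (pvG f) x) else ((0 : Int), "") := by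
  intro t
  induction t with
  | nil =>
    intro x
    rw [List.foldl_cons, List.foldl_nil, List.foldl_nil, pvStep_mk]
  | cons y t ih =>
    intro x
    rw [List.foldl_cons, pvStep_mk]
    by_cases hx : 0 < f x
    · rw [if_pos hx, pvPair f (y :: t) (f x) x x rfl]
      by_cases hm : f x < f ((y :: t).foldl (pvG f) x)
      · rw [if_pos hm, if_pos (lt_trans hx hm)]
      · rw [if_neg hm, pvFstay f (y :: t) x (not_lt.mp hm), if_pos hx]
    · rw [if_neg hx, ih y, List.foldl_cons]
      by_cases hxy : f x < f y
      · rw [show pvG f x y = y from by simp [pvG, hxy]]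
      · rw [show pvG f x y = x from by simp [pvG, hxy]]
        have hyle : f y ≤ 0 := le_trans (not_lt.mp hxy) (not_lt.mp hx)
        rcases pvGswap f t x y (not_lt.mp hx) hyle with heq | ⟨h1, h2⟩
        · rw [heq]
        · rw [if_neg (not_lt.mpr h1), if_neg (not_lt.mpr h2)]

-- the running first-maximum is the FIRST element attaining the maximum value
lemma pvFindFirst (f : String → Int) : ∀ (t : List String) (x : String),
    (x :: t).find? (fun n => f n == f (t.foldl (pvG f) x)) = some (t.foldl (pvG f) x) := by
  intro t
  induction t with
  | nil => intro x; simp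
  | cons z t ih =>
    intro x
    rw [List.foldl_cons]
    by_cases hxz : f x < f z
    · rw [show pvG f x z = z from by simp [pvG, hxz]]
      have hlt : f x < f (t.foldl (pvG f) z) := lt_of_lt_of_le hxz (pvFmono f t z)
      rw [List.find?_cons_of_neg (by simp [ne_of_lt hlt])]
      exact ih z
    · rw [show pvG f x z = x from by simp [pvG, hxz]]
      by_cases hx : f x = f (t.foldl (pvG f) x)
      · have h1 := ih x
        rw [List.find?_cons_of_pos (by simp [hx])] at h1
        have hxr : x = t.foldl (pvG f) x := Option.some.inj h1
        rw [List.find?_cons_of_pos (by simp [hx])]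
        rw [← hxr]
      · have hlt : f x < f (t.foldl (pvG f) x) := lt_of_le_of_ne (pvFmono f t x) hx
        have hz : f z < f (t.foldl (pvG f) x) := lt_of_le_of_lt (not_lt.mp hxz) hlt
        have h1 := ih x
        rw [List.find?_cons_of_neg (by simp [hx])] at h1
        rw [List.find?_cons_of_neg (by simp [hx]), List.find?_cons_of_neg (by simp [ne_of_lt hz])]
        exact h1

-- the plain running max over mapped values is the value of the running first-maximum
lemma pvMaxMap (f : String → Int) : ∀ (t : List String) (x : String),
    List.foldl max (f x) (t.map f) = f (t.foldl (pvG f) x) := by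
  intro t
  induction t with
  | nil => intro x; rfl
  | cons z t ih =>
    intro x
    rw [List.map_cons, List.foldl_cons, List.foldl_cons, ← ih (pvG f x z)]
    congr 1
    by_cases h : f x < f z
    · rw [show pvG f x z = z from by simp [pvG, h], max_eq_right (le_of_lt h)]
    · rw [show pvG f x z = x from by simp [pvG, h], max_eq_left (not_lt.mp h)]

-- B's max-then-first-match choice equals A's strictly-greater scan with '' sentinel and fallback
lemma pvSel (f : String → Int) (adj : List String) (hne : adj ≠ []) (h : ("" : String) ∉ adj) :
    (if 0 < (PySem.List.max? (adj.map f) (fun v => v)).getD 0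
       then (adj.find? (fun n => f n == (PySem.List.max? (adj.map f) (fun v => v)).getD 0)).getD ""
       else adj.headD "")
    = (if ((adj.foldl (fun (cn : Int × String) node => if cn.1 < f node then (f node, node) else cn) ((0 : Int), "")).2 = "")
       then adj.headD ""
       else (adj.foldl (fun (cn : Int × String) node => if cn.1 < f node then (f node, node) else cn) ((0 : Int), "")).2) := by
  have hstep : (fun (cn : Int × String) node => if cn.1 < f node then (f node, node) else cn) = pvStep f := rfl
  rw [hstep]
  cases adj with
  | nil => exact absurd rfl hne
  | cons x t =>
    have hmax : (PySem.List.max? ((x :: t).map f) (fun v => v)) = some (f (t.foldl (pvG f) x)) := by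
      rw [List.map_cons, PySem.List.max?_id_cons, pvMaxMap]
    rw [hmax, pvH f t x]
    simp only [Option.getD_some]
    have hrne : t.foldl (pvG f) x ≠ "" := fun he => h (he ▸ pvMem f t x)
    by_cases hp : 0 < f (t.foldl (pvG f) x)
    · rw [if_pos hp, pvFindFirst f t x]
      simp [hp, hrne]
    · rw [if_neg hp]
      simp [hp]

-- the element A/B choose is a member of the adjacency list
lemma pvNextMem (f : String → Int) (adj : List String) (hne : adj ≠ []) :
    (if ((adj.foldl (fun (cn : Int × String) node => if cn.1 < f node then (f node, node) else cn) ((0 : Int), "")).2 = "")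
       then adj.headD ""
       else (adj.foldl (fun (cn : Int × String) node => if cn.1 < f node then (f node, node) else cn) ((0 : Int), "")).2) ∈ adj := by
  have hstep : (fun (cn : Int × String) node => if cn.1 < f node then (f node, node) else cn) = pvStep f := rfl
  rw [hstep]
  cases adj with
  | nil => exact absurd rfl hne
  | cons x t =>
    rw [pvH f t x]
    by_cases hp : 0 < f (t.foldl (pvG f) x)
    · rw [if_pos hp]
      by_cases he : t.foldl (pvG f) x = ""
      · simp [he]
      · simpa [he] using pvMem f t x
    · rw [if_neg hp]
      simp

-- B's index/pop removal computes exactly A's remove-first-occurrence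
lemma pvPop_eq : ∀ (l : List String) (v : String), pvPopIndexed l v = pvRemoveFirst l v := by
  intro l v
  induction l with
  | nil => rfl
  | cons a l ih =>
    by_cases hav : a = v
    · subst hav
      unfold pvPopIndexed pvRemoveFirst
      rw [PySem.List.index?_cons_self, PySem.List.remove?_cons_self]
      simp [PySem.List.pop?_zero_cons]
    · unfold pvPopIndexed pvRemoveFirst
      rw [PySem.List.index?_cons_of_ne l hav, PySem.List.remove?_cons_of_ne l hav]
      cases hix : PySem.List.index? l v with
      | none =>
        have hrm : PySem.List.remove? l v = none :=
          (PySem.List.remove?_eq_none_iff l v).mpr ((PySem.List.index?_eq_none_iff l v).mp hix)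
        simp [hrm]
      | some k =>
        obtain ⟨hk, _, _⟩ := PySem.List.getElem_of_index?_eq_some hix
        have hk1 : k + 1 < (a :: l).length := by simpa using Nat.succ_lt_succ hk
        have hvl : v ∈ l := (PySem.List.index?_isSome_iff l v).mp (by rw [hix]; rfl)
        have hrm := PySem.List.remove?_eq_some_erase l v hvl
        have hel : l.eraseIdx k = l.erase v := by
          have h2 := ih
          unfold pvPopIndexed pvRemoveFirst at h2
          rw [hix, hrm] at h2
          simpa [PySem.List.pop?_natCast l k hk] using h2
        simp only [Option.map_some]
        rw [PySem.List.pop?_natCast (a :: l) (k + 1) hk1]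
        simp [hrm, List.eraseIdx_cons_succ, hel]

-- small facts about the degree-list updates
lemma pvDec0_ne {l : List Int} (h : l ≠ []) : pvDec0 l ≠ [] := by
  cases l with
  | nil => exact absurd rfl h
  | cons a t => simp [pvDec0]

lemma pvDec1_ne {l : List Int} (h : l ≠ []) : pvDec1 l ≠ [] := by
  rcases l with _ | ⟨a, _ | ⟨b, t⟩⟩
  · exact absurd rfl h
  · simp [pvDec1]
  · simp [pvDec1]

lemma pvDec1_head (l : List Int) : (pvDec1 l).getD 0 0 = l.getD 0 0 := by
  rcases l with _ | ⟨a, _ | ⟨b, t⟩⟩ <;> rfl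

lemma pvDec0_head {l : List Int} (h : l ≠ []) : (pvDec0 l).getD 0 0 = l.getD 0 0 - 1 := by
  cases l with
  | nil => exact absurd rfl h
  | cons a t => rfl

-- invariant: no adjacency list ever contains the node name ''
def pvGood (g : PySem.Dict String (List String)) : Prop := ∀ l ∈ g.values, ("" : String) ∉ l

-- invariant: every neighbour is a key of degrees with a nonempty degree list
def pvKeysOK (g : PySem.Dict String (List String)) (d : PySem.Dict String (List Int)) : Prop :=
  ∀ l ∈ g.values, ∀ v ∈ l, d.contains v = true ∧ d.getD v [] ≠ []

lemma pvAdj_mem_values (g : PySem.Dict String (List String)) (cur : String) (h : g.getD cur [] ≠ []) :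
    g.getD cur [] ∈ g.values := by
  cases hq : g.get? cur with
  | none => exact absurd (by simp [PySem.Dict.getD, hq]) h
  | some l =>
    have hv : l ∈ g.values := by
      have := PySem.Dict.mem_items_of_get?_eq_some g hq
      simp only [PySem.Dict.values]
      exact List.mem_map.mpr ⟨(cur, l), this, rfl⟩
    simpa [PySem.Dict.getD, hq] using hv

lemma pvGood_adj {g : PySem.Dict String (List String)} (h : pvGood g) (cur : String) :
    ("" : String) ∉ g.getD cur [] := by
  by_cases hne : g.getD cur [] = []
  · simp [hne]
  · exact h _ (pvAdj_mem_values g cur hne)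

lemma pvRemove_sub {l : List String} {v a : String} (ha : a ∈ pvRemoveFirst l v) : a ∈ l := by
  unfold pvRemoveFirst PySem.List.remove? at ha
  cases hidx : List.idxOf? v l with
  | none => simpa [hidx] using ha
  | some k =>
    simp only [hidx, Option.map_some, Option.getD_some] at ha
    exact List.mem_of_mem_eraseIdx ha

lemma pvGood_preserved {g : PySem.Dict String (List String)} (h : pvGood g) (cur v : String) :
    pvGood (g.modify cur [] (fun l => pvRemoveFirst l v)) := by
  intro l hl
  simp only [PySem.Dict.modify] at hl
  rcases PySem.Dict.mem_values_insert g cur _ l hl with he | hmem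
  · subst he
    intro hbad
    exact pvGood_adj h cur (pvRemove_sub hbad)
  · exact h l hmem

-- the two degree-dict modifications of A, seen through pvDeg0
lemma pvDeg0_step (d : PySem.Dict String (List Int)) (cur next n : String) (hdne : d.getD cur [] ≠ []) :
    pvDeg0 ((d.modify cur [] pvDec0).modify next [] pvDec1) n = if n = cur then pvDeg0 d cur - 1 else pvDeg0 d n := by
  unfold pvDeg0
  rw [PySem.Dict.getD_modify]
  by_cases h1 : n = next
  · subst h1
    rw [if_pos rfl, pvDec1_head, PySem.Dict.getD_modify]
    by_cases h2 : n = cur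
    · subst h2
      rw [if_pos rfl, if_pos rfl, pvDec0_head hdne]
    · rw [if_neg h2, if_neg h2]
  · rw [if_neg h1, PySem.Dict.getD_modify]
    by_cases h2 : n = cur
    · subst h2
      rw [if_pos rfl, if_pos rfl, pvDec0_head hdne]
    · rw [if_neg h2, if_neg h2]

lemma pvRelStep (d : PySem.Dict String (List Int)) (out : PySem.Dict String Int) (cur next : String)
    (hrel : ∀ n, out.getD n 0 = pvDeg0 d n) (hdne : d.getD cur [] ≠ []) :
    ∀ n, (out.modify cur 0 (fun x => x - 1)).getD n 0 = pvDeg0 ((d.modify cur [] pvDec0).modify next [] pvDec1) n := by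
  intro n
  rw [PySem.Dict.getD_modify, pvDeg0_step d cur next n hdne]
  by_cases h : n = cur
  · rw [if_pos h, if_pos h, hrel]
  · rw [if_neg h, if_neg h, hrel]

lemma pvContains_lift (d : PySem.Dict String (List Int)) (cur next v : String) (h : d.contains v = true) :
    ((d.modify cur [] pvDec0).modify next [] pvDec1).contains v = true := by
  rw [PySem.Dict.contains_modify, PySem.Dict.contains_modify]
  simp [h]

lemma pvNonempty_lift (d : PySem.Dict String (List Int)) (cur next v : String)
    (hdne : d.getD cur [] ≠ []) (h : d.getD v [] ≠ []) :
    ((d.modify cur [] pvDec0).modify next [] pvDec1).getD v [] ≠ [] := by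
  rw [PySem.Dict.getD_modify]
  by_cases h1 : v = next
  · subst h1
    rw [if_pos rfl]
    apply pvDec1_ne
    rw [PySem.Dict.getD_modify]
    by_cases h2 : v = cur
    · subst h2
      rw [if_pos rfl]
      exact pvDec0_ne hdne
    · rw [if_neg h2]
      exact h
  · rw [if_neg h1, PySem.Dict.getD_modify]
    by_cases h2 : v = cur
    · subst h2
      rw [if_pos rfl]
      exact pvDec0_ne hdne
    · rw [if_neg h2]
      exact h

lemma pvKeysOK_step {g : PySem.Dict String (List String)} {d : PySem.Dict String (List Int)}
    (hk : pvKeysOK g d) (cur next : String) (hdne : d.getD cur [] ≠ []) :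
    pvKeysOK (g.modify cur [] (fun l => pvRemoveFirst l next)) ((d.modify cur [] pvDec0).modify next [] pvDec1) := by
  intro l hl v hv
  have hbase : d.contains v = true ∧ d.getD v [] ≠ [] := by
    simp only [PySem.Dict.modify] at hl
    rcases PySem.Dict.mem_values_insert g cur _ l hl with he | hmem
    · subst he
      have hv' : v ∈ g.getD cur [] := pvRemove_sub hv
      exact hk _ (pvAdj_mem_values g cur (List.ne_nil_of_mem hv')) v hv'
    · exact hk l hmem v hv
  exact ⟨pvContains_lift d cur next v hbase.1, pvNonempty_lift d cur next v hdne hbase.2⟩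

-- B's initial counter dict agrees with pvDeg0 of A's degrees dict
lemma pvOutRel : ∀ (l : List (String × List Int)) (O : PySem.Dict String Int) (D : PySem.Dict String (List Int)),
    (∀ k, O.getD k 0 = (D.getD k []).getD 0 0) →
    ∀ n, (O.update (l.map (fun p => (p.1, PySem.List.pyGetD p.2 0 0)))).getD n 0 = ((D.update l).getD n []).getD 0 0 := by
  intro l
  induction l with
  | nil => intro O D h n; exact h n
  | cons p l ih =>
    intro O D h n
    rw [List.map_cons]
    show ((O.insert p.1 (PySem.List.pyGetD p.2 0 0)).update (l.map (fun p => (p.1, PySem.List.pyGetD p.2 0 0)))).getD n 0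
        = (((D.insert p.1 p.2).update l).getD n []).getD 0 0
    apply ih
    intro k
    rw [PySem.Dict.getD_insert, PySem.Dict.getD_insert]
    by_cases hkp : k = p.1
    · rw [if_pos hkp, if_pos hkp, PySem.List.pyGetD_zero]
    · rw [if_neg hkp, if_neg hkp, h]

lemma pvRelInit (degrees : List (String × List Int)) :
    ∀ n, (PySem.Dict.ofList (degrees.map (fun p => (p.1, PySem.List.pyGetD p.2 0 0)))).getD n 0
        = pvDeg0 (PySem.Dict.ofList degrees) n := by
  intro n
  unfold pvDeg0 PySem.Dict.ofList
  exact pvOutRel degrees PySem.Dict.empty PySem.Dict.empty (fun k => by simp [PySem.Dict.getD_empty]) n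

-- the accumulator loop of B computes acc ++ (A's recursion), for any fuel, under the invariants
lemma pvMain : ∀ (fuel : Nat) (cur : String) (g : PySem.Dict String (List String))
    (d : PySem.Dict String (List Int)) (out : PySem.Dict String Int) (acc : String),
    pvGood g → pvKeysOK g d → (∀ n, out.getD n 0 = pvDeg0 d n) →
    d.getD cur [] ≠ [] → g.getD cur [] ≠ [] →
    pvEulerLoopB fuel cur g out acc = acc ++ pvEulerRecA fuel cur g d := by
  intro fuel
  induction fuel with
  | zero => intro cur g d out acc _ _ _ _ _; simp [pvEulerLoopB, pvEulerRecA]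
  | succ fuel ih =>
    intro cur g d out acc hg hk hrel hdne hadj
    simp only [pvEulerLoopB, pvEulerRecA]
    simp only [hrel]
    rw [pvSel (pvDeg0 d) (g.getD cur []) hadj (pvGood_adj hg cur)]
    set nxt := (if ((List.foldl (fun (cn : Int × String) node => if cn.1 < pvDeg0 d node then (pvDeg0 d node, node) else cn) ((0 : Int), "") (g.getD cur [])).2 = "")
       then (g.getD cur []).headD ""
       else (List.foldl (fun (cn : Int × String) node => if cn.1 < pvDeg0 d node then (pvDeg0 d node, node) else cn) ((0 : Int), "") (g.getD cur [])).2) with hnxt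
    have hmemnext : nxt ∈ g.getD cur [] := hnxt ▸ pvNextMem (pvDeg0 d) (g.getD cur []) hadj
    have hpop : (fun l => pvPopIndexed l nxt) = (fun l => pvRemoveFirst l nxt) :=
      funext (fun l => pvPop_eq l nxt)
    rw [hpop]
    have hnk := hk _ (pvAdj_mem_values g cur hadj) nxt hmemnext
    by_cases hlen : (((g.modify cur [] (fun l => pvRemoveFirst l nxt)).getD nxt []).length) = 0
    · rw [if_neg (not_not_intro hlen), if_neg (not_not_intro hlen)]
    · rw [if_pos hlen, if_pos hlen]
      rw [ih nxt _ _ _ _ (pvGood_preserved hg cur nxt) (pvKeysOK_step hk cur nxt hdne)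
          (pvRelStep d out cur nxt hrel hdne)
          (pvNonempty_lift d cur nxt nxt hdne hnk.2)
          (fun he => hlen (by rw [he]; rfl))]
      simp [String.append_assoc]

-- ===== VERDICT (by name: the statement is the Claim_ definition above) =====
theorem get_euler_path_spec : Claim_equal_get_euler_path := by
  intro start_node graph degrees _ hpre
  obtain ⟨h1, h2, h3, h4, h5, h6⟩ := hpre
  unfold Spec_get_euler_path get_euler_path get_euler_path_alt
  have hgood : pvGood (PySem.Dict.ofList graph) := by
    intro l hl hbad
    simp only [PySem.Dict.values] at hl
    rcases List.mem_map.mp hl with ⟨p, hp, hpl⟩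
    exact (h6 p hp "" (hpl ▸ hbad)).1 rfl
  have hkeys : pvKeysOK (PySem.Dict.ofList graph) (PySem.Dict.ofList degrees) := by
    intro l hl v hv
    simp only [PySem.Dict.values] at hl
    rcases List.mem_map.mp hl with ⟨p, hp, hpl⟩
    obtain ⟨_, _, hcv, hlenv⟩ := h6 p hp v (hpl ▸ hv)
    refine ⟨hcv, fun he => ?_⟩
    rw [he] at hlenv
    simp at hlenv
  have hdne : (PySem.Dict.ofList degrees).getD start_node [] ≠ [] := by
    intro he
    rw [he] at h4
    simp at h4
  rw [pvMain (pvFuel graph) start_node _ _ _ "" hgood hkeys (pvRelInit degrees) hdne h2]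
  simp
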